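-- pv_equiv track=rewrite | github.com/arisada/libctf | textutils.py | bindifftable
-- ===== SOURCE A (Python) =====
-- def bindifftable(d1, d2):
-- 	"""Output a list of tupples (offset, orig, new) of the differences between d1 and d2"""
-- 	table = []
-- 	totallen = min(len(d1), len(d2))
-- 	offset = None
-- 	orig = ""
-- 	new =""
--
-- 	for i in range(totallen):
-- 		a = d1[i]
-- 		b = d2[i]
-- 		if offset != None:
-- 			if a != b:
-- 				orig +=a
-- 				new +=b
-- 			else:
-- 				table.append((offset, orig, new))
-- 				offset, orig, new = None, "",""
-- 		else:
-- 			if a != b: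
-- 				offset = i
-- 				orig = a
-- 				new = b
-- 	if offset != None:
-- 		table.append((offset, orig, new))
-- 	if len(d2) > totallen:
-- 		table.append((totallen, "", d2[totallen:]))
-- 	elif len(d1) > totallen:
-- 		raise Exception("cannot shrink in patches")
-- 	return table
-- ===== SOURCE B (Python) =====
-- def bindifftable(d1, d2):
-- 	"""Output a list of tupples (offset, orig, new) of the differences between d1 and d2"""
-- 	if len(d1) > len(d2):
-- 		raise Exception("cannot shrink in patches")
-- 	n = len(d1)
-- 	table = []
-- 	i = 0
-- 	while i < n:
-- 		if d1[i] != d2[i]: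
-- 			j = i + 1
-- 			while j < n and d1[j] != d2[j]:
-- 				j += 1
-- 			table.append((i, d1[i:j], d2[i:j]))
-- 			i = j
-- 		else:
-- 			i += 1
-- 	if len(d2) > n:
-- 		table.append((n, "", d2[n:]))
-- 	return table
-- ===== Notes on version B (the rewrite author's own statement) =====
-- stated objective: simpler
-- what changed: Replaces A's carried offset/orig/new state machine over range(totallen) with a direct run scan: find the start of each differing run, advance an inner index to its end, and emit the run as two slices; the length check moves to the top.
import Mathlib
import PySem

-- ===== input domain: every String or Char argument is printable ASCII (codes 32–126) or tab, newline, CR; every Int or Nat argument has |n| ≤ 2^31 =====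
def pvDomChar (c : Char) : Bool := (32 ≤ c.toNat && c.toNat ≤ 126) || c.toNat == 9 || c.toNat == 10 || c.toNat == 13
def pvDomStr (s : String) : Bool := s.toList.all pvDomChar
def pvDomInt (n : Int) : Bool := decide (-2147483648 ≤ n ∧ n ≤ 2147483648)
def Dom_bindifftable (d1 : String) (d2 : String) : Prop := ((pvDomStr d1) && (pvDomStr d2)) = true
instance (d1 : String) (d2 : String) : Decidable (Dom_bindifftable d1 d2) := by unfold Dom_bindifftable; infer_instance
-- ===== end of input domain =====

-- B replaces A's carried offset/orig/new state machine by a direct scan that slices out each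
-- differing run; same O(n) cost, plainer control flow. Return-value equivalence on Pre_.

-- ===== PORT A =====
-- loop state: (table, offset, orig, new); strings accumulated as List Char (exact for the
-- printable-ASCII domain), converted to String when placed into the table.
def aStep (c1 c2 : List Char)
    (st : List (Int × String × String) × Option Nat × List Char × List Char) (i : Nat) :
    List (Int × String × String) × Option Nat × List Char × List Char :=
  let a := c1.getD i ' '
  let b := c2.getD i ' '
  match st with
  | (table, some off, orig, new) =>
    if a ≠ b then (table, some off, orig ++ [a], new ++ [b])
    else (table ++ [((off : Int), String.mk orig, String.mk new)], none, [], [])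
  | (table, none, orig, new) =>
    if a ≠ b then (table, some i, [a], [b])
    else (table, none, orig, new)

-- the trailing 'if offset != None: table.append(...)'
def aFlush (st : List (Int × String × String) × Option Nat × List Char × List Char) :
    List (Int × String × String) :=
  match st with
  | (table, some off, orig, new) => table ++ [((off : Int), String.mk orig, String.mk new)]
  | (table, none, _, _) => table

def bindifftable (d1 : String) (d2 : String) : List (Int × String × String) :=
  let c1 := d1.toList
  let c2 := d2.toList
  let totallen := min c1.length c2.length
  let table := aFlush ((List.range totallen).foldl (aStep c1 c2) ([], none, [], []))
  if c2.length > totallen then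
    table ++ [((totallen : Int), "", String.mk (c2.drop totallen))]
  else table  -- the elif branch raises (len(d1) > totallen): outside Pre_

-- ===== PORT B =====
-- inner 'while j < n and d1[j] != d2[j]: j += 1'; fuel = n - j at the call site
def bScan (c1 c2 : List Char) (n : Nat) : Nat → Nat → Nat
  | j, 0 => j
  | j, fuel + 1 =>
    if j < n ∧ c1.getD j ' ' ≠ c2.getD j ' ' then bScan c1 c2 n (j + 1) fuel else j

-- d1[i:j] for 0 ≤ i ≤ j is exactly (drop i).take (j - i)
def bSeg (c : List Char) (i j : Nat) : List Char := (c.drop i).take (j - i)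

-- outer 'while i < n'; fuel = n - i suffices since i strictly increases
def bMain (c1 c2 : List Char) (n : Nat) : Nat → Nat → List (Int × String × String)
  | _, 0 => []
  | i, fuel + 1 =>
    if i < n then
      if c1.getD i ' ' ≠ c2.getD i ' ' then
        let j := bScan c1 c2 n (i + 1) (n - (i + 1))
        ((i : Int), String.mk (bSeg c1 i j), String.mk (bSeg c2 i j)) ::
          bMain c1 c2 n j fuel
      else bMain c1 c2 n (i + 1) fuel
    else []

def bindifftable_alt (d1 : String) (d2 : String) : List (Int × String × String) :=
  let c1 := d1.toList
  let c2 := d2.toList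
  if c1.length > c2.length then []  -- Python B raises here: outside Pre_
  else
    let n := c1.length
    let table := bMain c1 c2 n 0 n
    if c2.length > n then table ++ [((n : Int), "", String.mk (c2.drop n))]
    else table

-- ===== PRECONDITION & SPEC =====
-- Pre_ excludes exactly the inputs with len(d1) > len(d2), on which Python A raises
-- Exception("cannot shrink in patches") (and Python B raises the same exception).
def Pre_bindifftable (d1 : String) (d2 : String) : Prop := d1.toList.length ≤ d2.toList.length
instance (d1 : String) (d2 : String) : Decidable (Pre_bindifftable d1 d2) := by
  unfold Pre_bindifftable; infer_instance

def pvWitness_bindifftable : String × String := ("abc", "axcd")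

def Spec_bindifftable (d1 : String) (d2 : String) (out : List (Int × String × String)) : Prop := out = bindifftable_alt d1 d2
instance (d1 : String) (d2 : String) (out : List (Int × String × String)) : Decidable (Spec_bindifftable d1 d2 out) := by unfold Spec_bindifftable; infer_instance

-- ===== CLAIM (what is proved, stated in full; the proofs are below) =====
def Claim_equal_bindifftable : Prop := ∀ (d1 : String) (d2 : String), Dom_bindifftable d1 d2 → Pre_bindifftable d1 d2 → Spec_bindifftable d1 d2 (bindifftable d1 d2)

-- ===== LEMMAS AND PROOFS =====

-- one cons step of a segment
theorem drop_getD_cons (c : List Char) :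
    ∀ i, i < c.length → c.drop i = c.getD i ' ' :: c.drop (i + 1) := by
  induction c with
  | nil => intro i h; simp at h
  | cons a t ih =>
    intro i h
    cases i with
    | zero => simp
    | succ m =>
      simp only [List.drop_succ_cons, List.getD_cons_succ]
      exact ih m (by simpa using h)

theorem bSeg_cons (c : List Char) (i j : Nat) (hij : i < j) (hc : i < c.length) :
    bSeg c i j = c.getD i ' ' :: bSeg c (i + 1) j := by
  unfold bSeg
  have h2 : j - i = (j - (i + 1)) + 1 := by omega
  rw [drop_getD_cons c i hc, h2, List.take_succ_cons]

theorem bSeg_self (c : List Char) (i : Nat) : bSeg c i i = [] := by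
  simp [bSeg]

theorem bScan_ge (c1 c2 : List Char) (n : Nat) :
    ∀ fuel j, j ≤ bScan c1 c2 n j fuel := by
  intro fuel
  induction fuel with
  | zero => intro j; simp [bScan]
  | succ f ih =>
    intro j
    simp only [bScan]
    split
    · exact le_trans (Nat.le_succ j) (ih (j + 1))
    · exact le_refl j

theorem bMain_stop (c1 c2 : List Char) (n : Nat) (i fuel : Nat) (h : ¬ i < n) :
    bMain c1 c2 n i fuel = [] := by
  cases fuel with
  | zero => rfl
  | succ f => simp [bMain, h]

-- The simultaneous invariant: resuming A's fold at index i with k = n - i steps left,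
-- from the "no open run" state (P) or an open run (off, orig, new) (Q),
-- produces exactly B's remaining output.
theorem loop_inv (c1 c2 : List Char) (n : Nat) (h1 : n ≤ c1.length) (h2 : n ≤ c2.length) :
    ∀ k,
      (∀ i table fuel, i + k = n → k ≤ fuel →
        aFlush ((List.range' i k).foldl (aStep c1 c2) (table, none, [], [])) =
          table ++ bMain c1 c2 n i fuel) ∧
      (∀ i table off orig new fuel, i + k = n → k ≤ fuel →
        aFlush ((List.range' i k).foldl (aStep c1 c2) (table, some off, orig, new)) =
          table ++ ((off : Int),
              String.mk (orig ++ bSeg c1 i (bScan c1 c2 n i k)),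
              String.mk (new ++ bSeg c2 i (bScan c1 c2 n i k))) ::
            bMain c1 c2 n (bScan c1 c2 n i k) fuel) := by
  intro k
  induction k with
  | zero =>
    constructor
    · intro i table fuel hik _
      simp [List.range', aFlush, bMain_stop c1 c2 n i fuel (by omega)]
    · intro i table off orig new fuel hik _
      simp [List.range', aFlush, bScan, bSeg_self,
        bMain_stop c1 c2 n i fuel (by omega)]
  | succ k ih =>
    obtain ⟨ihP, ihQ⟩ := ih
    constructor
    · -- P (k+1)
      intro i table fuel hik hfuel
      have hin : i < n := by omega
      obtain ⟨f, rfl⟩ : ∃ f, fuel = f + 1 := ⟨fuel - 1, by omega⟩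
      rw [List.range'_succ, List.foldl_cons]
      by_cases hab : c1.getD i ' ' ≠ c2.getD i ' '
      · have step : aStep c1 c2 (table, none, [], []) i =
            (table, some i, [c1.getD i ' '], [c2.getD i ' ']) := by
          simp only [aStep]; rw [if_pos hab]
        rw [step, ihQ (i + 1) table i [c1.getD i ' '] [c2.getD i ' '] f
            (by omega) (by omega)]
        have hk : k = n - (i + 1) := by omega
        set j := bScan c1 c2 n (i + 1) k with hj
        have hij : i < j := lt_of_lt_of_le (Nat.lt_succ_self i) (bScan_ge c1 c2 n k (i + 1))
        simp only [bMain]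
        rw [if_pos hin, if_pos hab, ← hk, ← hj,
          bSeg_cons c1 i j hij (by omega), bSeg_cons c2 i j hij (by omega)]
        simp
      · have step : aStep c1 c2 (table, none, [], []) i = (table, none, [], []) := by
          simp only [aStep]; rw [if_neg hab]
        rw [step, ihP (i + 1) table f (by omega) (by omega)]
        simp only [bMain]
        rw [if_pos hin, if_neg hab]
    · -- Q (k+1)
      intro i table off orig new fuel hik hfuel
      have hin : i < n := by omega
      rw [List.range'_succ, List.foldl_cons]
      by_cases hab : c1.getD i ' ' ≠ c2.getD i ' '
      · have step : aStep c1 c2 (table, some off, orig, new) i =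
            (table, some off, orig ++ [c1.getD i ' '], new ++ [c2.getD i ' ']) := by
          simp only [aStep]; rw [if_pos hab]
        rw [step, ihQ (i + 1) table off (orig ++ [c1.getD i ' ']) (new ++ [c2.getD i ' '])
            fuel (by omega) (by omega)]
        have hscan : bScan c1 c2 n i (k + 1) = bScan c1 c2 n (i + 1) k := by
          simp only [bScan]; rw [if_pos ⟨hin, hab⟩]
        set j := bScan c1 c2 n (i + 1) k with hj
        have hij : i < j := lt_of_lt_of_le (Nat.lt_succ_self i) (bScan_ge c1 c2 n k (i + 1))
        rw [hscan, bSeg_cons c1 i j hij (by omega), bSeg_cons c2 i j hij (by omega)]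
        simp
      · have step : aStep c1 c2 (table, some off, orig, new) i =
            (table ++ [((off : Int), String.mk orig, String.mk new)], none, [], []) := by
          simp only [aStep]; rw [if_neg hab]
        obtain ⟨f, rfl⟩ : ∃ f, fuel = f + 1 := ⟨fuel - 1, by omega⟩
        rw [step, ihP (i + 1) (table ++ [((off : Int), String.mk orig, String.mk new)]) f
            (by omega) (by omega)]
        have hscan : bScan c1 c2 n i (k + 1) = i := by
          simp only [bScan]; rw [if_neg (fun h => hab h.2)]
        rw [hscan, bSeg_self, bSeg_self]
        simp only [bMain]
        rw [if_pos hin, if_neg hab]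
        simp

-- ===== VERDICT (by name: the statement is the Claim_ definition above) =====
theorem bindifftable_spec : Claim_equal_bindifftable := by
  intro d1 d2 _ hpre
  unfold Spec_bindifftable bindifftable bindifftable_alt
  have hpre' : d1.toList.length ≤ d2.toList.length := hpre
  have hmin : min d1.toList.length d2.toList.length = d1.toList.length := by omega
  have hng : ¬ d1.toList.length > d2.toList.length := by omega
  simp only [hmin, if_neg hng]
  have := (loop_inv d1.toList d2.toList d1.toList.length (le_refl _) hpre'
      d1.toList.length).1 0 [] d1.toList.length (by omega) (le_refl _)
  rw [← List.range_eq_range'] at this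
  simp only [List.nil_append] at this
  rw [this]
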